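-- pv_equiv track=rewrite | github.com/Hissam12/news_summarizer | bias_detection/bias_analyzer.py | _group_by_source
-- ===== SOURCE A (Python) =====
-- from typing import List, Dict, Optional, Tuple
--
-- def _group_by_source(articles: List[Dict]) -> Dict[str, List[Dict]]:
--     """Group articles by their source"""
--     source_groups = {}
--
--     for article in articles:
--         source = article.get('source', 'Unknown')
--         if source not in source_groups:
--             source_groups[source] = []
--         source_groups[source].append(article)
--
--     return source_groups
-- ===== SOURCE B (Python) =====
-- def _group_by_source(articles):
--     """Group articles by their source"""
--     keys = dict.fromkeys(article.get('source', 'Unknown') for article in articles)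
--     return {k: [a for a in articles if a.get('source', 'Unknown') == k] for k in keys}
-- ===== Notes on version B (the rewrite author's own statement) =====
-- stated objective: alternative
-- what changed: Instead of incrementally growing per-key lists in one dict pass, B first collects the distinct source keys in first-occurrence order (dict.fromkeys) and then builds each group in one filtering comprehension per key.
import Mathlib
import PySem

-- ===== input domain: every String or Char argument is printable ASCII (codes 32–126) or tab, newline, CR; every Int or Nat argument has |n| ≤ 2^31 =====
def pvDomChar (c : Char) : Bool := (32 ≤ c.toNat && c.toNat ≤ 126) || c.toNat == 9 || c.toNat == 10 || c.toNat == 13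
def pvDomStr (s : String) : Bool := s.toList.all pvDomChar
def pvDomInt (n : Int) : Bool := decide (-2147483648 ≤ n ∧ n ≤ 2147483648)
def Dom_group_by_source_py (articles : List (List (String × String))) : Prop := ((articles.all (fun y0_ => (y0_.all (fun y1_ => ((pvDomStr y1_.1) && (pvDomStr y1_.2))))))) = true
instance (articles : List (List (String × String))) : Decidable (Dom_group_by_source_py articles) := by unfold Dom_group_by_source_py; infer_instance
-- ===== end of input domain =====

-- B replaces A's incremental dict-of-lists pass by: collect distinct source keys in
-- first-occurrence order, then build each group by filtering the articles per key.


-- article.get('source', 'Unknown')  (shared helper: the same expression occurs in A and B)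
def pvKey (a : List (String × String)) : String :=
  PySem.Dict.getD (PySem.Dict.mk a) "source" "Unknown"

-- ===== PORT A =====
def group_by_source_py (articles : List (List (String × String))) : List (String × List (List (String × String))) :=
  (articles.foldl (fun d a =>
      let s := pvKey a
      let d := if d.contains s then d else d.insert s []
      d.modify s [] (fun l => l ++ [a]))
    (PySem.Dict.empty : PySem.Dict String (List (List (String × String))))).items

-- ===== PORT B =====
def group_by_source_py_alt (articles : List (List (String × String))) : List (String × List (List (String × String))) :=
  let keys := PySem.List.dedup (articles.map pvKey)
  keys.map (fun k => (k, articles.filter (fun a => pvKey a == k)))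

-- ===== PRECONDITION & SPEC =====
def Spec_group_by_source_py (articles : List (List (String × String))) (out : List (String × List (List (String × String)))) : Prop := out = group_by_source_py_alt articles
instance (articles : List (List (String × String))) (out : List (String × List (List (String × String)))) : Decidable (Spec_group_by_source_py articles out) := by unfold Spec_group_by_source_py; infer_instance

-- ===== CLAIM (what is proved, stated in full; the proofs are below) =====
def Claim_equal_group_by_source_py : Prop := ∀ (articles : List (List (String × String))), Dom_group_by_source_py articles → Spec_group_by_source_py articles (group_by_source_py articles)

-- ===== LEMMAS AND PROOFS =====

-- A's loop body (insert-if-absent then append) is exactly 'modify s [] (· ++ [a])'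
theorem step_eq_modify (d : PySem.Dict String (List (List (String × String)))) (a : List (String × String)) :
    (let s := pvKey a
     let d := if d.contains s then d else d.insert s []
     d.modify s [] (fun l => l ++ [a]))
    = d.modify (pvKey a) [] (fun l => l ++ [a]) := by
  by_cases h : d.contains (pvKey a)
  · simp only [h, if_true]
  · have h' : d.contains (pvKey a) = false := by simpa using h
    simp only [PySem.Dict.modify, h', Bool.false_eq_true, if_false,
      PySem.Dict.getD_insert_self, PySem.Dict.insert_insert_self,
      PySem.Dict.getD_of_not_contains d [] h']

theorem fold_eq (articles : List (List (String × String))) :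
    articles.foldl (fun d a =>
        let s := pvKey a
        let d := if d.contains s then d else d.insert s []
        d.modify s [] (fun l => l ++ [a]))
      (PySem.Dict.empty : PySem.Dict String (List (List (String × String))))
    = (articles.map (fun a => (pvKey a, a))).foldl
        (fun d p => d.modify p.1 [] (fun l => l ++ [p.2])) PySem.Dict.empty := by
  rw [List.foldl_map]
  exact PySem.List.foldl_congr_mem _ _ _ _ (fun d a _ => step_eq_modify d a)

-- ===== VERDICT (by name: the statement is the Claim_ definition above) =====
theorem group_by_source_py_spec : Claim_equal_group_by_source_py := by
  intro articles _
  show group_by_source_py articles = group_by_source_py_alt articles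
  unfold group_by_source_py group_by_source_py_alt
  rw [fold_eq]
  have hnd : ((articles.map (fun a => (pvKey a, a))).foldl
      (fun d p => d.modify p.1 [] (fun l => l ++ [p.2]))
      (PySem.Dict.empty : PySem.Dict String (List (List (String × String))))).keys.Nodup :=
    PySem.Dict.nodup_keys_foldl_modify_key _ Prod.fst [] (fun _ p => (· ++ [p.2])) _
      (by simp [PySem.Dict.keys_empty])
  rw [PySem.Dict.items_eq_map_keys _ hnd []]
  rw [PySem.Dict.keys_foldl_modify_key _ Prod.fst [] (fun _ p => (· ++ [p.2]))]
  simp only [PySem.Dict.keys_empty, PySem.Set.update_nil_left, List.map_map,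
    PySem.List.dedup_eq_ofList]
  have hcomp : (Prod.fst ∘ fun a => (pvKey a, a)) = pvKey := rfl
  rw [hcomp]
  apply List.map_congr_left
  intro k _
  rw [PySem.Dict.getD_foldl_modify_append]
  simp [List.filter_map, Function.comp_def]
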